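-- pv_equiv track=rewrite | github.com/shahinmnm/Poker-Telegram-Bot | pokerapp/winnerdetermination.py | _group_hand_by_value
-- ===== SOURCE A (Python) =====
-- from typing import List, Tuple, Dict
--
-- def _group_hand_by_value(hand_values: List[int]) -> Tuple[List[int], List[int]]:
--     dict_hand = {}
--     for i in hand_values:
--         dict_hand[i] = dict_hand.get(i, 0) + 1
--     sorted_dict_items = sorted(dict_hand.items(), key=lambda item: (item[1], item[0]))
--     counts = [item[1] for item in sorted_dict_items]
--     keys = [item[0] for item in sorted_dict_items]
--     return (counts, keys)
-- ===== SOURCE B (Python) =====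
-- from typing import List, Tuple
--
-- def _group_hand_by_value(hand_values: List[int]) -> Tuple[List[int], List[int]]:
--     pairs = []
--     for v in sorted(hand_values):
--         if pairs and pairs[-1][0] == v:
--             pairs[-1] = (v, pairs[-1][1] + 1)
--         else:
--             pairs.append((v, 1))
--     pairs.sort(key=lambda p: (p[1], p[0]))
--     return ([p[1] for p in pairs], [p[0] for p in pairs])
-- ===== Notes on version B (the rewrite author's own statement) =====
-- stated objective: alternative
-- what changed: B replaces A's dict-counting pass (hash map value->count, then sort the items) by sorting the values and collapsing consecutive equal runs into (value, count) pairs, then sorting those pairs by (count, value).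
import Mathlib
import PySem

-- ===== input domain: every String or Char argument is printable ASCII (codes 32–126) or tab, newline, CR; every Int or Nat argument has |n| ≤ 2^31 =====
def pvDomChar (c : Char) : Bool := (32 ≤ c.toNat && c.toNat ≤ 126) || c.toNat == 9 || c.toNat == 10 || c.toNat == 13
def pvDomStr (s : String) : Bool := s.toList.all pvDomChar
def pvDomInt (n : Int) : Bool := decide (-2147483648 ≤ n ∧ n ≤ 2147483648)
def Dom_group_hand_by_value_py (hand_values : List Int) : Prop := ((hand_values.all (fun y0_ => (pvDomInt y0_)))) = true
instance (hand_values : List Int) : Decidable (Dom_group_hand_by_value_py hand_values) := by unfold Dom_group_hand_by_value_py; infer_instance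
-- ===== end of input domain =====

-- B replaces A's dict-counting pass by sorting the values and collapsing consecutive runs into
-- (value, count) pairs (objective: alternative — a different grouping mechanism, same final sort).

-- ===== PORT A =====
def group_hand_by_value_py (hand_values : List Int) : List Int × List Int :=
  let dict_hand := hand_values.foldl (fun d i => d.insert i (d.getD i 0 + 1)) PySem.Dict.empty
  let sorted_dict_items := PySem.List.sorted2 dict_hand.items (fun item => item.2) (fun item => item.1)
  let counts := sorted_dict_items.map (fun item => item.2)
  let keys := sorted_dict_items.map (fun item => item.1)
  (counts, keys)

-- ===== PORT B =====
-- one iteration of Source B's run-collapsing loop: bump the last pair if it has the same value, else start a new pair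
def pvStep (pairs : List (Int × Int)) (v : Int) : List (Int × Int) :=
  match pairs.getLast? with
  | some last => if last.1 == v then pairs.dropLast ++ [(v, last.2 + 1)] else pairs ++ [(v, 1)]
  | none => pairs ++ [(v, 1)]

def group_hand_by_value_py_alt (hand_values : List Int) : List Int × List Int :=
  let run_pairs := (PySem.List.sorted hand_values (fun x => x) false).foldl pvStep []
  let pairs := PySem.List.sorted2 run_pairs (fun p => p.2) (fun p => p.1)
  (pairs.map (fun p => p.2), pairs.map (fun p => p.1))

-- ===== PRECONDITION & SPEC =====
def Spec_group_hand_by_value_py (hand_values : List Int) (out : List Int × List Int) : Prop := out = group_hand_by_value_py_alt hand_values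
instance (hand_values : List Int) (out : List Int × List Int) : Decidable (Spec_group_hand_by_value_py hand_values out) := by unfold Spec_group_hand_by_value_py; infer_instance

-- ===== CLAIM (what is proved, stated in full; the proofs are below) =====
def Claim_equal_group_hand_by_value_py : Prop := ∀ (hand_values : List Int), Dom_group_hand_by_value_py hand_values → Spec_group_hand_by_value_py hand_values (group_hand_by_value_py hand_values)

-- ===== LEMMAS AND PROOFS =====

-- a no-op prepended set element distributes out of the Set.add fold
theorem pv_foldl_add_cons (s : List Int) : ∀ (v : Int) (acc : List Int), v ∉ s →
    s.foldl PySem.Set.add (v :: acc) = v :: s.foldl PySem.Set.add acc := by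
  induction s with
  | nil => intro v acc _; rfl
  | cons x t ih =>
      intro v acc hv
      have hxv : x ≠ v := by intro h; exact hv (by simp [h])
      have hstep : PySem.Set.add (v :: acc) x = v :: PySem.Set.add acc x := by
        simp [PySem.Set.add, PySem.Set.contains, hxv]
        split <;> rfl
      simp only [List.foldl_cons, hstep]
      exact ih v _ (fun h => hv (List.mem_cons_of_mem _ h))

-- dropping elements already present in the accumulator does not change the Set.add fold
theorem pv_foldl_add_filter (s : List Int) : ∀ (v : Int) (acc : List Int), v ∈ acc →
    s.foldl PySem.Set.add acc = (s.filter (fun x => decide (x ≠ v))).foldl PySem.Set.add acc := by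
  induction s with
  | nil => intro v acc _; rfl
  | cons x t ih =>
      intro v acc hv
      by_cases hx : x = v
      · subst hx
        have hadd : PySem.Set.add acc x = acc := by
          simp [PySem.Set.add, PySem.Set.contains, hv]
        have hf : (x :: t).filter (fun y => decide (y ≠ x)) = t.filter (fun y => decide (y ≠ x)) := by
          simp
        rw [hf, List.foldl_cons, hadd]
        exact ih x acc hv
      · have hmem : v ∈ PySem.Set.add acc x := by
          simp [PySem.Set.add]; split <;> simp [hv]
        have hf : (x :: t).filter (fun y => decide (y ≠ v)) = x :: t.filter (fun y => decide (y ≠ v)) := by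
          simp [hx]
        rw [hf, List.foldl_cons, List.foldl_cons]
        exact ih v _ hmem

-- first-occurrence structure of set(xs): head, then the distinct elements of the head-free rest
theorem pv_ofList_cons (v : Int) (t : List Int) :
    PySem.Set.ofList (v :: t) = v :: PySem.Set.ofList (t.filter (fun x => decide (x ≠ v))) := by
  rw [PySem.Set.ofList_eq_foldl, PySem.Set.ofList_eq_foldl]
  have h1 : PySem.Set.add ([] : List Int) v = [v] := by
    simp [PySem.Set.add, PySem.Set.contains]
  simp only [List.foldl_cons, h1]
  rw [pv_foldl_add_filter t v [v] (by simp)]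
  exact pv_foldl_add_cons _ v [] (by simp)

-- the run-collapsing fold over a nondecreasing list, started just after opening the pair (v, j):
-- it closes that pair at j + (count of v) and then lists the later values with their counts
theorem pv_foldl_step (s : List Int) (hs : s.Pairwise (· ≤ ·)) :
    ∀ (acc₀ : List (Int × Int)) (v j : Int), (∀ x ∈ s, v ≤ x) →
      s.foldl pvStep (acc₀ ++ [(v, j)]) =
        acc₀ ++ [(v, j + (s.count v : Int))] ++
          (PySem.Set.ofList (s.filter (fun x => decide (x ≠ v)))).map
            (fun k => (k, (s.count k : Int))) := by
  induction s with
  | nil => intro acc₀ v j _; simp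
  | cons x t ih =>
      intro acc₀ v j hle
      have ht : t.Pairwise (· ≤ ·) := hs.tail
      have hxt : ∀ y ∈ t, x ≤ y := fun y hy => (List.pairwise_cons.mp hs).1 y hy
      by_cases hx : x = v
      · subst hx
        have hstep : pvStep (acc₀ ++ [(x, j)]) x = acc₀ ++ [(x, j + 1)] := by
          simp [pvStep]
        rw [List.foldl_cons, hstep, ih ht acc₀ x (j + 1) hxt]
        have hf : (x :: t).filter (fun y => decide (y ≠ x)) = t.filter (fun y => decide (y ≠ x)) := by
          simp
        rw [hf]
        have hmap : (PySem.Set.ofList (t.filter (fun y => decide (y ≠ x)))).map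
              (fun k => (k, (t.count k : Int))) =
            (PySem.Set.ofList (t.filter (fun y => decide (y ≠ x)))).map
              (fun k => (k, ((x :: t).count k : Int))) := by
          apply List.map_congr_left
          intro k hk
          have hkx : k ≠ x := by
            simpa using (List.mem_filter.mp ((PySem.Set.mem_ofList _ k).mp hk)).2
          simp [Ne.symm hkx]
        have harith : j + 1 + ((t.count x : Nat) : Int) = j + (((x :: t).count x : Nat) : Int) := by
          rw [List.count_cons_self]; push_cast; ring
        rw [hmap, harith]
      · -- x ≠ v : v occurs nowhere in x :: t, a new pair (x, 1) is opened
        have hvx : v < x := lt_of_le_of_ne (hle x (by simp)) (Ne.symm hx)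
        have hvnot : v ∉ x :: t := by
          intro hmem
          rcases List.mem_cons.mp hmem with h | h
          · exact hx h.symm
          · exact absurd (hxt v h) (not_le.mpr hvx)
        have hstep : pvStep (acc₀ ++ [(v, j)]) x = (acc₀ ++ [(v, j)]) ++ [(x, 1)] := by
          simp [pvStep, Ne.symm hx]
        rw [List.foldl_cons, hstep, ih ht (acc₀ ++ [(v, j)]) x 1 hxt]
        have hcv : ((x :: t).count v : Int) = 0 := by
          simp [List.count_eq_zero_of_not_mem hvnot]
        have hfv : (x :: t).filter (fun y => decide (y ≠ v)) = x :: t := by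
          apply List.filter_eq_self.mpr
          intro y hy
          simp
          intro h; subst h; exact hvnot hy
        rw [hfv, pv_ofList_cons, List.map_cons]
        have hcnt : ∀ k, k ≠ x → (t.filter (fun y => decide (y ≠ x))).count k = (x :: t).count k := by
          intro k hk
          rw [List.count_filter (by simpa using hk)]
          simp [Ne.symm hk]
        have hmapeq :
            (PySem.Set.ofList (t.filter (fun y => decide (y ≠ x)))).map
                (fun k => (k, (t.count k : Int))) =
            (PySem.Set.ofList (t.filter (fun y => decide (y ≠ x)))).map
                (fun k => (k, ((x :: t).count k : Int))) := by
          apply List.map_congr_left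
          intro k hk
          have hkx : k ≠ x := by
            have hmem := (PySem.Set.mem_ofList _ k).mp hk
            simpa using (List.mem_filter.mp hmem).2
          rw [← hcnt k hkx, List.count_filter (by simpa using hkx)]
        have harith : (1 : Int) + ((t.count x : Nat) : Int) = (((x :: t).count x : Nat) : Int) := by
          rw [List.count_cons_self]; push_cast; ring
        rw [hmapeq, harith, hcv]
        simp
-- the whole run-collapsing loop over a nondecreasing list yields the (value, count) pairs
-- in first-occurrence order
theorem pv_runfold (s : List Int) (hs : s.Pairwise (· ≤ ·)) :
    s.foldl pvStep [] =
      (PySem.Set.ofList s).map (fun k => (k, (s.count k : Int))) := by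
  cases s with
  | nil => rfl
  | cons v t =>
      have hstep : pvStep [] v = [] ++ [(v, 1)] := rfl
      rw [List.foldl_cons, hstep,
        pv_foldl_step t hs.tail [] v 1 (fun y hy => (List.pairwise_cons.mp hs).1 y hy),
        pv_ofList_cons, List.map_cons]
      have hcnt : ∀ k, k ≠ v → (t.filter (fun y => decide (y ≠ v))).count k = (v :: t).count k := by
        intro k hk
        rw [List.count_filter (by simpa using hk)]
        simp [Ne.symm hk]
      have hmapeq :
          (PySem.Set.ofList (t.filter (fun y => decide (y ≠ v)))).map
              (fun k => (k, (t.count k : Int))) =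
          (PySem.Set.ofList (t.filter (fun y => decide (y ≠ v)))).map
              (fun k => (k, ((v :: t).count k : Int))) := by
        apply List.map_congr_left
        intro k hk
        have hkv : k ≠ v := by
          have hmem := (PySem.Set.mem_ofList _ k).mp hk
          simpa using (List.mem_filter.mp hmem).2
        rw [← hcnt k hkv, List.count_filter (by simpa using hkv)]
      have harith : (1 : Int) + ((t.count v : Nat) : Int) = (((v :: t).count v : Nat) : Int) := by
        rw [List.count_cons_self]; push_cast; ring
      rw [hmapeq, harith]
      simp

-- sorted2 with keys (p.2, p.1) is sorting by the lexicographic key toLex (p.2, p.1)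
theorem pv_sorted2_eq_sorted_lex (xs : List (Int × Int)) :
    PySem.List.sorted2 xs (fun p => p.2) (fun p => p.1) false =
      PySem.List.sorted xs (fun p => toLex (p.2, p.1)) false := by
  rw [PySem.List.sorted_eq_foldl_insertBy]
  show xs.foldl (fun acc x => PySem.List.insertBy _ x acc) [] = _
  have hb : (fun (a b : Int × Int) =>
      decide (a.2 < b.2) || !decide (b.2 < a.2) && decide (a.1 < b.1)) =
      (fun (a b : Int × Int) => decide (toLex (a.2, a.1) < toLex (b.2, b.1))) := by
    funext a b
    rcases lt_trichotomy a.2 b.2 with h | h | h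
    · simp [Prod.Lex.toLex_lt_toLex, h]
    · simp [Prod.Lex.toLex_lt_toLex, h]
    · simp [Prod.Lex.toLex_lt_toLex, h, not_lt.mpr (le_of_lt h)]
      intro he
      exact absurd (he ▸ h) (lt_irrefl _)
  simp only [hb]
  rfl

-- sorting pairs by the strict key (count, value) gives the same list on any rearrangement
theorem pv_sorted2_congr_perm (xs ys : List (Int × Int)) (h : xs.Perm ys) :
    PySem.List.sorted2 xs (fun p => p.2) (fun p => p.1) false =
      PySem.List.sorted2 ys (fun p => p.2) (fun p => p.1) false := by
  rw [pv_sorted2_eq_sorted_lex, pv_sorted2_eq_sorted_lex]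
  apply PySem.List.eq_of_perm_of_pairwise_le_of_injective (fun p => toLex (p.2, p.1))
  · intro p q hpq
    have := congrArg ofLex hpq
    simp at this
    exact Prod.ext this.2 this.1
  · exact (PySem.List.sorted_perm xs _ false).trans
      (h.trans (PySem.List.sorted_perm ys _ false).symm)
  · exact PySem.List.sorted_pairwise xs _
  · exact PySem.List.sorted_pairwise ys _

-- ===== VERDICT (by name: the statement is the Claim_ definition above) =====
theorem group_hand_by_value_py_spec : Claim_equal_group_hand_by_value_py := by
  intro hand_values _
  unfold Spec_group_hand_by_value_py group_hand_by_value_py group_hand_by_value_py_alt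
  have hitems : (hand_values.foldl (fun d i => d.insert i (d.getD i 0 + 1)) PySem.Dict.empty).items
      = (PySem.Set.ofList hand_values).map (fun k => (k, (hand_values.count k : Int))) := by
    rw [PySem.Dict.foldl_insert_getD_add_one_eq_counter, PySem.Dict.items_counter]
  have hsortedlist := PySem.List.sorted_perm hand_values (fun x => x) false
  have hruns : (PySem.List.sorted hand_values (fun x => x) false).foldl pvStep [] =
      (PySem.Set.ofList (PySem.List.sorted hand_values (fun x => x) false)).map
        (fun k => (k, ((PySem.List.sorted hand_values (fun x => x) false).count k : Int))) :=
    pv_runfold _ (PySem.List.sorted_pairwise hand_values (fun x => x))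
  -- the two pair lists are permutations of each other
  have hsetperm : (PySem.Set.ofList (PySem.List.sorted hand_values (fun x => x) false)).Perm
      (PySem.Set.ofList hand_values) := by
    rw [List.perm_ext_iff_of_nodup (PySem.Set.nodup_ofList _) (PySem.Set.nodup_ofList _)]
    intro a
    rw [PySem.Set.mem_ofList, PySem.Set.mem_ofList, PySem.List.mem_sorted]
  have hcounts : ∀ k, ((PySem.List.sorted hand_values (fun x => x) false).count k : Int)
      = (hand_values.count k : Int) := by
    intro k; rw [List.Perm.count_eq hsortedlist]
  have hpairsperm : ((PySem.List.sorted hand_values (fun x => x) false).foldl pvStep []).Perm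
      ((hand_values.foldl (fun d i => d.insert i (d.getD i 0 + 1)) PySem.Dict.empty).items) := by
    rw [hitems, hruns]
    have : (PySem.Set.ofList (PySem.List.sorted hand_values (fun x => x) false)).map
        (fun k => (k, ((PySem.List.sorted hand_values (fun x => x) false).count k : Int))) =
        (PySem.Set.ofList (PySem.List.sorted hand_values (fun x => x) false)).map
        (fun k => (k, (hand_values.count k : Int))) := by
      apply List.map_congr_left; intro k _; rw [hcounts]
    rw [this]
    exact hsetperm.map _
  have hs2 := pv_sorted2_congr_perm _ _ hpairsperm
  simp only [hs2]
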